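-- pv_equiv track=rewrite | github.com/iliyaML/data-mining-project | find_fds.py | find_all_keys
-- ===== SOURCE A (Python) =====
-- def find_all_keys(data, depth, target=[], output=[]):
--     """
--     Finding all possible keys of list_keys_fds via recursion
--     (Combination problem)
--
--     Input:
--         data    - a list containing the first row elements
--         depth   - integer that limits the depth of search through the space of
--                   domains of functional dependencies
--         target  - threshold for identifying adequately approximate list_keys_fds
--         output  - a list container that holds all the possible FD keys
--
--     Output:
--         output/list_keys_fds - a list of all FD keys.
--     """
--     for i in range(len(data)):
--         new_target = target[:]
--         new_data = data[:]
--         new_target.append(data[i])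
--         new_data = data[i+1:]
--
--         # Only consider keys up to length of depth
--         if len(new_target) <= depth:
--             output.append(new_target)
--             find_all_keys(new_data, depth, new_target, output)
--     return output
-- ===== SOURCE B (Python) =====
-- def find_all_keys(data, depth, target=[], output=[]):
--     # Iterative depth-first traversal with an explicit stack instead of recursion.
--     stack = []
--     if len(target) + 1 <= depth:
--         for i in range(len(data) - 1, -1, -1):
--             stack.append((target + [data[i]], data[i + 1:]))
--     while stack:
--         t, xs = stack.pop()
--         output.append(t)
--         if len(t) + 1 <= depth:
--             for i in range(len(xs) - 1, -1, -1):
--                 stack.append((t + [xs[i]], xs[i + 1:]))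
--     return output
-- ===== Notes on version B (the rewrite author's own statement) =====
-- stated objective: alternative
-- what changed: replaces the recursive pre-order enumeration of combinations with an iterative depth-first traversal driven by an explicit stack of (prefix, remaining-suffix) frames, dropping A's dead per-iteration full-list copy (new_data = data[:])
import Mathlib
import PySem

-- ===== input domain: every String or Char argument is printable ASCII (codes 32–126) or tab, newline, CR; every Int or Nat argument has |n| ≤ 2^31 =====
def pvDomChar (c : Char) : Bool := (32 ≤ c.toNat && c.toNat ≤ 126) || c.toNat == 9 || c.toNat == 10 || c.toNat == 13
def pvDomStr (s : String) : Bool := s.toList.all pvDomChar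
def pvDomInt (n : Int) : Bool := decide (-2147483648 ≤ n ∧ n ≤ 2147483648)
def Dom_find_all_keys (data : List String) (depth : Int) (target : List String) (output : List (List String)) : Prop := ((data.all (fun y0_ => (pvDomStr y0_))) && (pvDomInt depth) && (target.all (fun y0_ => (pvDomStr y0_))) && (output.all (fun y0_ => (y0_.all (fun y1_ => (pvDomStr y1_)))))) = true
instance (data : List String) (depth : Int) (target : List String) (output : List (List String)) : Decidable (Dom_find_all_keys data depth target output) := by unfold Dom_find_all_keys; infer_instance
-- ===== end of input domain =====

-- B replaces A's recursive pre-order enumeration with an explicit-stack iterative DFS, dropping A's dead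
-- per-iteration data[:] copy (a timing run measured B faster); both mutate/return the caller's `output`
-- list, equivalence is about the return value.


-- ===== PORT A =====
-- Literal port of A: the for-loop over i (element data[i], tail data[i+1:]) is the structural
-- recursion on `data`; at each step the gated append + recursive descent produces `out2`, then the
-- loop continues on the tail with the same target.
def find_all_keys (data : List String) (depth : Int) (target : List String) (output : List (List String)) : List (List String) :=
  match data with
  | [] => output
  | x :: rest =>
    let new_target := target ++ [x]
    let out2 := if ((new_target.length : Int) ≤ depth) then
        find_all_keys rest depth new_target (output ++ [new_target]) else output
    find_all_keys rest depth target out2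

-- ===== PORT B =====
-- faChildren t xs = [(t+[xs[i]], xs[i+1:]) for i in range(len(xs))]; Source B pushes these in reversed
-- order onto the stack (a Python list whose END is the top), so with head-is-top Lean lists the
-- pushed block is exactly this forward-order list prepended.
def faChildren (t : List String) (xs : List String) : List (List String × List String) :=
  match xs with
  | [] => []
  | x :: r => (t ++ [x], r) :: faChildren t r

def faWeight (st : List (List String × List String)) : Nat :=
  (st.map (fun e => 2 ^ e.2.length)).sum

theorem faWeight_append (a b : List (List String × List String)) :
    faWeight (a ++ b) = faWeight a + faWeight b := by
  simp [faWeight]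

theorem faWeight_children (t xs) : faWeight (faChildren t xs) = 2 ^ xs.length - 1 := by
  induction xs with
  | nil => simp [faChildren, faWeight]
  | cons x r ih =>
    have h1 : 1 ≤ 2 ^ r.length := Nat.one_le_two_pow
    simp only [faChildren, faWeight, List.map_cons, List.sum_cons] at *
    rw [ih]; rw [List.length_cons, pow_succ]; omega

-- the while-loop of Source B: pop (t, xs), append t to output, push the (reversed) children if gated
def faLoop (depth : Int) (stack : List (List String × List String)) (out : List (List String)) : List (List String) :=
  match stack with
  | [] => out
  | (t, xs) :: rest =>
    if ((t.length : Int) + 1 ≤ depth) then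
      faLoop depth (faChildren t xs ++ rest) (out ++ [t])
    else
      faLoop depth rest (out ++ [t])
termination_by faWeight stack
decreasing_by
  · have h1 : 1 ≤ 2 ^ xs.length := Nat.one_le_two_pow
    rw [faWeight_append, faWeight_children]
    simp only [faWeight, List.map_cons, List.sum_cons]
    omega
  · have h1 : 1 ≤ 2 ^ xs.length := Nat.one_le_two_pow
    simp only [faWeight, List.map_cons, List.sum_cons]
    omega

def find_all_keys_alt (data : List String) (depth : Int) (target : List String) (output : List (List String)) : List (List String) :=
  let stack := if ((target.length : Int) + 1 ≤ depth) then faChildren target data else []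
  faLoop depth stack output

-- ===== PRECONDITION & SPEC =====
def Spec_find_all_keys (data : List String) (depth : Int) (target : List String) (output : List (List String)) (out : List (List String)) : Prop := out = find_all_keys_alt data depth target output
instance (data : List String) (depth : Int) (target : List String) (output : List (List String)) (out : List (List String)) : Decidable (Spec_find_all_keys data depth target output out) := by unfold Spec_find_all_keys; infer_instance

-- ===== CLAIM (what is proved, stated in full; the proofs are below) =====
def Claim_equal_find_all_keys : Prop := ∀ (data : List String) (depth : Int) (target : List String) (output : List (List String)), Dom_find_all_keys data depth target output → Spec_find_all_keys data depth target output (find_all_keys data depth target output)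

-- ===== LEMMAS AND PROOFS =====

-- A accumulates: result = output ++ (what it emits starting from [])
theorem fa_out (data : List String) (depth : Int) :
    ∀ (target : List String) (out : List (List String)),
      find_all_keys data depth target out = out ++ find_all_keys data depth target [] := by
  induction data with
  | nil => intro t out; simp [find_all_keys]
  | cons x rest ih =>
    intro t out
    simp only [find_all_keys]
    split_ifs with hc
    · rw [ih (t ++ [x]) (out ++ [t ++ [x]]), ih (t ++ [x]) ([] ++ [t ++ [x]])]
      rw [ih t (out ++ [t ++ [x]] ++ find_all_keys rest depth (t ++ [x]) []),
          ih t ([] ++ [t ++ [x]] ++ find_all_keys rest depth (t ++ [x]) [])]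
      simp
    · exact ih t out

-- if even a one-longer target exceeds depth, A emits nothing
theorem fa_nil_of_gate (data : List String) (depth : Int) :
    ∀ (target : List String), ¬ ((target.length : Int) + 1 ≤ depth) →
      find_all_keys data depth target [] = [] := by
  induction data with
  | nil => intro t _; simp [find_all_keys]
  | cons x rest ih =>
    intro t hg
    simp only [find_all_keys]
    have : ¬ (((t ++ [x]).length : Int) ≤ depth) := by
      simp only [List.length_append, List.length_cons, List.length_nil]; push_cast; omega
    rw [if_neg this]
    exact ih t hg

-- the stack loop accumulates likewise
theorem faLoop_out (depth : Int) :
    ∀ (n : Nat) (st : List (List String × List String)), faWeight st = n →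
      ∀ (out : List (List String)), faLoop depth st out = out ++ faLoop depth st [] := by
  intro n
  induction n using Nat.strong_induction_on with
  | _ n ih =>
    intro st hst out
    match st with
    | [] => simp [faLoop]
    | (t, xs) :: rest =>
      have h1 : 1 ≤ 2 ^ xs.length := Nat.one_le_two_pow
      have hw : faWeight ((t, xs) :: rest) = 2 ^ xs.length + faWeight rest := by
        simp [faWeight]
      simp only [faLoop]
      split_ifs with hc
      · have hlt : faWeight (faChildren t xs ++ rest) < n := by
          rw [faWeight_append, faWeight_children]; omega
        rw [ih _ hlt _ rfl (out ++ [t]), ih _ hlt _ rfl ([] ++ [t])]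
        simp
      · have hlt : faWeight rest < n := by omega
        rw [ih _ hlt _ rfl (out ++ [t]), ih _ hlt _ rfl ([] ++ [t])]
        simp

-- main simulation: running the loop on the children of (target, data) emits exactly A's output
theorem faLoop_children (depth : Int) :
    ∀ (xs t : List String) (rest : List (List String × List String)) (out : List (List String)),
      ((t.length : Int) + 1 ≤ depth) →
      faLoop depth (faChildren t xs ++ rest) out
        = out ++ find_all_keys xs depth t [] ++ faLoop depth rest [] := by
  intro xs
  induction xs with
  | nil =>
    intro t rest out _
    simp only [faChildren, List.nil_append, find_all_keys, List.append_nil]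
    exact faLoop_out depth _ rest rfl out
  | cons x r ih =>
    intro t rest out hg
    simp only [faChildren, List.cons_append, faLoop]
    have hlen : (((t ++ [x]).length : Int) + 1 ≤ depth) ↔ ((t.length : Int) + 2 ≤ depth) := by
      simp only [List.length_append, List.length_cons, List.length_nil]; push_cast; omega
    split_ifs with hc
    · -- children of t++[x] pushed on top
      rw [List.append_assoc] at *
      rw [ih (t ++ [x]) (faChildren t r ++ rest) (out ++ [t ++ [x]]) hc]
      rw [ih t rest [] hg]
      -- right-hand side: unfold A one step
      simp only [find_all_keys]
      have hcA : (((t ++ [x]).length : Int) ≤ depth) := by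
        simp only [List.length_append, List.length_cons, List.length_nil]; push_cast; omega
      rw [if_pos hcA]
      rw [fa_out r depth (t ++ [x]) ([] ++ [t ++ [x]])]
      rw [fa_out r depth t ([] ++ [t ++ [x]] ++ find_all_keys r depth (t ++ [x]) [])]
      simp
    · rw [ih t rest (out ++ [t ++ [x]]) hg]
      simp only [find_all_keys]
      have hcA : (((t ++ [x]).length : Int) ≤ depth) := by
        simp only [List.length_append, List.length_cons, List.length_nil]; push_cast; omega
      rw [if_pos hcA]
      have hE1 : find_all_keys r depth (t ++ [x]) [] = [] := by
        apply fa_nil_of_gate; rw [hlen] at hc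
        simp only [List.length_append, List.length_cons, List.length_nil]; push_cast; omega
      rw [fa_out r depth (t ++ [x]) ([] ++ [t ++ [x]]), hE1]
      rw [fa_out r depth t ([] ++ [t ++ [x]] ++ [])]
      simp

-- ===== VERDICT (by name: the statement is the Claim_ definition above) =====
theorem find_all_keys_spec : Claim_equal_find_all_keys := by
  intro data depth target output _
  unfold Spec_find_all_keys find_all_keys_alt
  split_ifs with hg
  · have := faLoop_children depth data target [] output hg
    simp only [List.append_nil] at this
    rw [this, fa_out data depth target output]
    simp [faLoop]
  · simp only [faLoop]
    rw [fa_out data depth target output, fa_nil_of_gate data depth target hg]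
    simp
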